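-- pv_equiv track=rewrite | github.com/mykespb/leetcoding | lc-oneedit.py | try_insert
-- ===== SOURCE A (Python) =====
-- def try_insert(s: str, t: str) -> bool:
--     """solve insertion subtask"""
--
--     chars = set(t)
--
--     for pos in range(0, len(s)+1):
--         for char in chars:
--             nova = s[:pos] + char + s[pos:]
--             if nova == t:
--                 return True
--
--     return False
-- ===== SOURCE B (Python) =====
-- def try_insert(s: str, t: str) -> bool:
--     """solve insertion subtask"""
--     if len(t) != len(s) + 1:
--         return False
--     i = 0
--     while i < len(s) and s[i] == t[i]:
--         i += 1
--     return s[i:] == t[i+1:]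
-- ===== Notes on version B (the rewrite author's own statement) =====
-- stated objective: faster
-- what changed: Replaces the try-every-position-times-every-character rebuild-and-compare search with a length check plus a single two-pointer scan to the first mismatch followed by one suffix comparison.
import Mathlib
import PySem

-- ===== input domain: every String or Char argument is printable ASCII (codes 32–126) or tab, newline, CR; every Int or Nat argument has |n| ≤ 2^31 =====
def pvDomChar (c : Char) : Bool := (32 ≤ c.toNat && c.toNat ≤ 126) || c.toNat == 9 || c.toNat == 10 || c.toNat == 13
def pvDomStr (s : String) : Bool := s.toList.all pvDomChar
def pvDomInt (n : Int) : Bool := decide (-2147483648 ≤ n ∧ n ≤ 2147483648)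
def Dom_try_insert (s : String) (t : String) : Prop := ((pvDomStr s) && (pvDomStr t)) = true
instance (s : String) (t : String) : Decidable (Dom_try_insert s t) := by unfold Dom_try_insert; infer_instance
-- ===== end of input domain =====

-- B replaces A's try-every-position × every-character rebuild-and-compare search by a length
-- check plus a single two-pointer scan to the first mismatch and one suffix comparison.

-- ===== PORT A =====
-- A: chars = set(t); for pos in range(0, len(s)+1): for char in chars:
--      if s[:pos] + char + s[pos:] == t: return True;  return False
def tryInsertACore (s t : List Char) : Bool :=
  let chars : PySem.Set Char := PySem.Set.ofList t
  (PySem.List.pyRange 0 ((s.length : Int) + 1)).any (fun pos =>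
    chars.any (fun c =>
      (PySem.List.slice s none (some pos) ++ c :: PySem.List.slice s (some pos) none) == t))

def try_insert (s : String) (t : String) : Bool :=
  tryInsertACore s.toList t.toList

-- ===== PORT B =====
-- two-pointer scan: advance while chars agree, then compare s[i:] with t[i+1:].
-- The (c :: _, []) case is unreachable under the length guard in try_insert_alt
-- (B's Python never evaluates it either: len(t) = len(s)+1 keeps t[i] in range).
def tpScan : List Char → List Char → Bool
  | [], trest => trest.drop 1 == ([] : List Char)
  | _ :: _, [] => false
  | c :: s', d :: t' => if c == d then tpScan s' t' else (c :: s') == t'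

def try_insert_alt (s : String) (t : String) : Bool :=
  if t.toList.length = s.toList.length + 1 then tpScan s.toList t.toList else false

-- ===== PRECONDITION & SPEC =====
def Spec_try_insert (s : String) (t : String) (out : Bool) : Prop := out = try_insert_alt s t
instance (s : String) (t : String) (out : Bool) : Decidable (Spec_try_insert s t out) := by unfold Spec_try_insert; infer_instance

-- ===== CLAIM (what is proved, stated in full; the proofs are below) =====
def Claim_equal_try_insert : Prop := ∀ (s : String) (t : String), Dom_try_insert s t → Spec_try_insert s t (try_insert s t)

-- ===== LEMMAS AND PROOFS =====

-- "t is obtained from s by inserting one character"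
def InsOne (s t : List Char) : Prop :=
  ∃ (pos : Nat) (c : Char), pos ≤ s.length ∧ t = s.take pos ++ c :: s.drop pos

theorem insOne_length {s t : List Char} (h : InsOne s t) : t.length = s.length + 1 := by
  obtain ⟨pos, c, hpos, ht⟩ := h
  subst ht
  simp

theorem insOne_cons {a : Char} {s' t' : List Char} :
    InsOne (a :: s') (a :: t') ↔ InsOne s' t' := by
  constructor
  · rintro ⟨pos, c, hpos, ht⟩
    cases pos with
    | zero =>
      simp at ht
      exact ⟨0, a, by omega, by simp [ht.2]⟩
    | succ k =>
      simp at ht hpos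
      exact ⟨k, c, by omega, ht⟩
  · rintro ⟨pos, c, hpos, ht⟩
    exact ⟨pos + 1, c, by simpa using hpos, by simp [ht]⟩

theorem insOne_cons_ne {a d : Char} {s' t' : List Char} (hne : a ≠ d) :
    InsOne (a :: s') (d :: t') ↔ t' = a :: s' := by
  constructor
  · rintro ⟨pos, c, hpos, ht⟩
    cases pos with
    | zero => simp at ht; exact ht.2
    | succ k => simp at ht; exact absurd ht.1.symm hne
  · rintro rfl
    exact ⟨0, d, by omega, by simp⟩

theorem tpScan_iff (s : List Char) : ∀ t : List Char, t.length = s.length + 1 →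
    (tpScan s t = true ↔ InsOne s t) := by
  induction s with
  | nil =>
    intro t hlen
    match t, hlen with
    | [d], _ =>
      exact ⟨fun _ => ⟨0, d, Nat.zero_le _, rfl⟩, fun _ => rfl⟩
  | cons a s' ih =>
    intro t hlen
    match t, hlen with
    | d :: t', hlen =>
      simp only [tpScan]
      by_cases had : a = d
      · subst had
        simp only [BEq.rfl, if_true]
        rw [ih t' (by simpa using hlen), insOne_cons]
      · rw [if_neg (by simpa using had)]
        rw [insOne_cons_ne had]
        simp only [beq_iff_eq]
        exact ⟨fun h => h.symm, fun h => h.symm⟩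

theorem aCore_iff (s t : List Char) : tryInsertACore s t = true ↔ InsOne s t := by
  unfold tryInsertACore
  simp only [List.any_eq_true, PySem.List.mem_pyRange_one, beq_iff_eq]
  constructor
  · rintro ⟨pos, ⟨h0, hlt⟩, c, _, heq⟩
    refine ⟨pos.toNat, c, by omega, ?_⟩
    rw [PySem.List.slice_to s h0, PySem.List.slice_from s h0] at heq
    exact heq.symm
  · rintro ⟨pos, c, hpos, ht⟩
    refine ⟨(pos : Int), ⟨by omega, by omega⟩, c, ?_, ?_⟩
    · rw [PySem.Set.mem_ofList]
      rw [ht]; simp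
    · rw [PySem.List.slice_to_natCast, PySem.List.slice_from_natCast]
      exact ht.symm

theorem core_eq (s t : List Char) :
    tryInsertACore s t = (if t.length = s.length + 1 then tpScan s t else false) := by
  by_cases hlen : t.length = s.length + 1
  · rw [if_pos hlen]
    have h := (aCore_iff s t).trans (tpScan_iff s t hlen).symm
    cases hA : tryInsertACore s t with
    | true => exact (h.mp hA).symm
    | false =>
      cases hB : tpScan s t with
      | false => rfl
      | true => exact absurd (h.mpr hB) (by simp [hA])
  · rw [if_neg hlen]
    cases hA : tryInsertACore s t with
    | false => rfl
    | true => exact absurd (insOne_length ((aCore_iff s t).mp hA)) hlen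

-- ===== VERDICT (by name: the statement is the Claim_ definition above) =====
theorem try_insert_spec : Claim_equal_try_insert := by
  intro s t _
  unfold Spec_try_insert try_insert try_insert_alt
  exact core_eq s.toList t.toList
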